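-- pv_equiv track=rewrite | github.com/pianzhu/stradns-demo | src/context_retrieval/logic.py | _extract_room_from_name
-- ===== SOURCE A (Python) =====
-- def _overlaps(span: tuple[int, int], other: tuple[int, int]) -> bool:
--     return span[0] < other[1] and other[0] < span[1]
--
-- def _extract_room_from_name(
--     name: str,
--     room_terms: list[str],
-- ) -> tuple[str | None, bool]:
--     if not name or not room_terms:
--         return None, False
--
--     spans: list[tuple[int, int]] = []
--     matched: list[str] = []
--
--     for term in room_terms:
--         start = 0
--         while True:
--             idx = name.find(term, start)
--             if idx < 0:
--                 break
--             span = (idx, idx + len(term))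
--             if any(_overlaps(span, existing) for existing in spans):
--                 start = idx + 1
--                 continue
--             spans.append(span)
--             matched.append(term)
--             start = idx + len(term)
--
--     unique: list[str] = []
--     seen: set[str] = set()
--     for term in matched:
--         if term in seen:
--             continue
--         seen.add(term)
--         unique.append(term)
--
--     if not unique:
--         return None, False
--     if len(unique) > 1:
--         return None, True
--     return unique[0], False
-- ===== SOURCE B (Python) =====
-- def _extract_room_from_name(name, room_terms):
--     if not name or not room_terms:
--         return None, False
--
--     def occurrences(term):
--         w = len(term)
--         return [i for i in range(len(name)) if name[i:i + w] == term]
--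
--     # first term with any occurrence: it is always matched (coverage is empty then)
--     first = None
--     for j, term in enumerate(room_terms):
--         if occurrences(term):
--             first = j
--             break
--     if first is None:
--         return None, False
--     t1 = room_terms[first]
--
--     # greedy left-to-right non-overlapping spans of t1 (a scalar last_end suffices)
--     spans = []
--     last_end = 0
--     for i in occurrences(t1):
--         if last_end <= i:
--             spans.append((i, i + len(t1)))
--             last_end = i + len(t1)
--
--     # a second distinct term matches iff it has an occurrence disjoint from t1's spans
--     if any(
--         term != t1
--         and any(
--             all(e <= i or i + len(term) <= s for (s, e) in spans)
--             for i in occurrences(term)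
--         )
--         for term in room_terms[first + 1:]
--     ):
--         return None, True
--     return t1, False
-- ===== Notes on version B (the rewrite author's own statement) =====
-- stated objective: alternative
-- what changed: Replaces A's stateful greedy simulation over all terms (repeated str.find with skip-by-one, a growing span list scanned for every candidate, then a dedup pass) by a semantic characterization: the first term occurring in the name always matches, its spans are a simple last_end greedy over precomputed occurrence positions, and any later distinct term matches iff it has one occurrence disjoint from those spans, with an immediate (None, True) early exit.
import Mathlib
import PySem

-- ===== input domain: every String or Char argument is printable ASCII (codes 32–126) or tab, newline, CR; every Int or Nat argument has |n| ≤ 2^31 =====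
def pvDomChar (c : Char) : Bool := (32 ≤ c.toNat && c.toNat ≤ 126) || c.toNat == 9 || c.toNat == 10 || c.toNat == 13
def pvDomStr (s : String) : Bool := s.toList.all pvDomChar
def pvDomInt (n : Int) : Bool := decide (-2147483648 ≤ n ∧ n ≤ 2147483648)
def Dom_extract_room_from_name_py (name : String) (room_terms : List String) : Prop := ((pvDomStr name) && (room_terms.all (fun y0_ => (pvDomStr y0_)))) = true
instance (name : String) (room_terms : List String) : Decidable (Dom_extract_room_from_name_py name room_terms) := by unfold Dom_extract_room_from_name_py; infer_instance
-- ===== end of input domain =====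

-- B replaces A's stateful greedy simulation over all terms by a characterization: the first
-- occurring term always matches; its spans come from a last_end greedy over occurrence positions;
-- a later distinct term matches iff it has one occurrence disjoint from those spans (early exit).


-- ===== PORT A =====
def pvOverlaps (span other : Int × Int) : Bool :=
  decide (span.1 < other.2) && decide (other.1 < span.2)

-- A's 'while True' find loop; fuel s.length + 2 covers every iteration the Python
-- loop performs before it breaks (inside Pre_, start grows by ≥ 1 per iteration)
def pvAInner (s term : List Char) (fuel : Nat) (start : Int)
    (spans : List (Int × Int)) (matched : List (List Char)) :
    List (Int × Int) × List (List Char) :=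
  match fuel with
  | 0 => (spans, matched)
  | fuel + 1 =>
    let idx := PySem.Chars.findFrom s term start
    if idx < 0 then (spans, matched)
    else
      let span : Int × Int := (idx, idx + (term.length : Int))
      if spans.any (fun existing => pvOverlaps span existing) then
        pvAInner s term fuel (idx + 1) spans matched
      else
        pvAInner s term fuel (idx + (term.length : Int)) (spans ++ [span]) (matched ++ [term])

-- A's seen-set dedup loop
def pvAUnique (ts : List (List Char)) (seen : PySem.Set (List Char))
    (unique : List (List Char)) : List (List Char) :=
  match ts with
  | [] => unique
  | t :: rest =>
    if PySem.Set.contains seen t then pvAUnique rest seen unique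
    else pvAUnique rest (PySem.Set.add seen t) (unique ++ [t])

def extract_room_from_name_py (name : String) (room_terms : List String) : Option String × Bool :=
  if name.toList = [] ∨ room_terms = [] then (none, false) else
  let s := name.toList
  let res := (room_terms.map String.toList).foldl
      (fun st term => pvAInner s term (s.length + 2) 0 st.1 st.2) ([], [])
  let unique := pvAUnique res.2 PySem.Set.empty []
  if unique = [] then (none, false)
  else if 1 < unique.length then (none, true)
  else (some (String.ofList (unique.headD [])), false)

-- ===== PORT B =====
-- occurrences(term): [i for i in range(len(name)) if name[i:i+w] == term]
def pvOcc (s term : List Char) : List Int :=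
  (PySem.List.pyRange 0 (s.length : Int) 1).filter
    (fun i => decide (PySem.List.slice s (some i) (some (i + (term.length : Int))) = term))

-- B's 'for j, term in enumerate(...): if occurrences(term): first = j; break'
def pvFirstIdx (s : List Char) (terms : List (List Char)) (j : Nat) : Option Nat :=
  match terms with
  | [] => none
  | t :: rest => if pvOcc s t ≠ [] then some j else pvFirstIdx s rest (j + 1)

def extract_room_from_name_py_alt (name : String) (room_terms : List String) : Option String × Bool :=
  if name.toList = [] ∨ room_terms = [] then (none, false) else
  let s := name.toList
  let terms := room_terms.map String.toList
  match pvFirstIdx s terms 0 with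
  | none => (none, false)
  | some j =>
    let t1 := terms.getD j []
    -- greedy left-to-right spans of t1: a scalar last_end suffices
    let spans := ((pvOcc s t1).foldl
        (fun st i => if st.2 ≤ i then (st.1 ++ [(i, i + (t1.length : Int))], i + (t1.length : Int)) else st)
        ([], 0)).1
    -- a second distinct term matches iff it has an occurrence disjoint from spans
    if (terms.drop (j + 1)).any (fun t =>
          decide (t ≠ t1) && (pvOcc s t).any (fun i =>
            spans.all (fun p => decide (p.2 ≤ i) || decide (i + (t.length : Int) ≤ p.1))))
    then (none, true)
    else (some (String.ofList t1), false)

-- ===== PRECONDITION & SPEC =====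
-- Pre_ excludes nonempty names together with an empty string among room_terms: there
-- Python A's inner loop never advances (name.find('', start) = start and start is left
-- unchanged by the accepting branch), so A diverges and returns nothing.
def Pre_extract_room_from_name_py (name : String) (room_terms : List String) : Prop :=
  name.toList = [] ∨ ∀ t ∈ room_terms, t.toList ≠ []
instance (name : String) (room_terms : List String) : Decidable (Pre_extract_room_from_name_py name room_terms) := by unfold Pre_extract_room_from_name_py; infer_instance

def pvWitness_extract_room_from_name_py : String × List String := ("conference room 7", ["room", "suite", "room"])

def Spec_extract_room_from_name_py (name : String) (room_terms : List String) (out : Option String × Bool) : Prop := out = extract_room_from_name_py_alt name room_terms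
instance (name : String) (room_terms : List String) (out : Option String × Bool) : Decidable (Spec_extract_room_from_name_py name room_terms out) := by unfold Spec_extract_room_from_name_py; infer_instance

-- ===== CLAIM (what is proved, stated in full; the proofs are below) =====
def Claim_equal_extract_room_from_name_py : Prop := ∀ (name : String) (room_terms : List String), Dom_extract_room_from_name_py name room_terms → Pre_extract_room_from_name_py name room_terms → Spec_extract_room_from_name_py name room_terms (extract_room_from_name_py name room_terms)

-- ===== LEMMAS AND PROOFS =====

-- the run of accepted spans found by repeated find from an uncovered tail
def pvCanon (s t : List Char) (fuel : Nat) (start : Int) : List (Int × Int) :=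
  match fuel with
  | 0 => []
  | fuel + 1 =>
    let idx := PySem.Chars.findFrom s t start
    if idx < 0 then []
    else (idx, idx + (t.length : Int)) :: pvCanon s t fuel (idx + (t.length : Int))

theorem pv_prefix_drop_infix (s t : List Char) (k : Nat) (h : t <+: s.drop k) : t <:+: s :=
  h.isInfix.trans (s.drop_suffix k).isInfix

theorem pv_mem_pvOcc (s t : List Char) (i : Int) :
    i ∈ pvOcc s t ↔ 0 ≤ i ∧ i < (s.length : Int) ∧ t <+: s.drop i.toNat := by
  unfold pvOcc
  rw [List.mem_filter, PySem.List.mem_pyRange_one]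
  constructor
  · rintro ⟨⟨h0, hlt⟩, hd⟩
    rw [decide_eq_true_eq,
        PySem.List.slice_toNat s h0 (by have := t.length; omega),
        show ((i + (t.length : Int)).toNat - i.toNat) = t.length by omega] at hd
    exact ⟨h0, hlt, List.prefix_iff_eq_take.mpr hd.symm⟩
  · rintro ⟨h0, hlt, hp⟩
    refine ⟨⟨h0, hlt⟩, ?_⟩
    rw [decide_eq_true_eq,
        PySem.List.slice_toNat s h0 (by have := t.length; omega),
        show ((i + (t.length : Int)).toNat - i.toNat) = t.length by omega]
    exact (List.prefix_iff_eq_take.mp hp).symm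

theorem pv_pvOcc_pairwise (s t : List Char) : (pvOcc s t).Pairwise (· < ·) := by
  exact (PySem.List.pairwise_lt_pyRange_one _ _).sublist List.filter_sublist

-- A's loop on a term whose accepted spans all end before start accepts every find hit
theorem pvAInner_accepts (s t : List Char) (ht : t ≠ []) :
    ∀ (fuel : Nat) (start : Int) (spans : List (Int × Int)) (matched : List (List Char)),
      0 ≤ start → start ≤ (s.length : Int) → (∀ p ∈ spans, p.2 ≤ start) →
      pvAInner s t fuel start spans matched
        = (spans ++ pvCanon s t fuel start,
           matched ++ (pvCanon s t fuel start).map (fun _ => t)) := by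
  intro fuel
  induction fuel with
  | zero => intro start spans matched _ _ _; simp [pvAInner, pvCanon]
  | succ fuel ih =>
    intro start spans matched h0 hsl hsp
    simp only [pvAInner, pvCanon]
    by_cases hneg : PySem.Chars.findFrom s t start < 0
    · simp [if_pos hneg]
    · simp only [if_neg hneg]
      have hne : PySem.Chars.findFrom s t start ≠ -1 := by omega
      have hsk : ((start.toNat : Int)) = start := Int.toNat_of_nonneg h0
      have hkle : start.toNat ≤ s.length := by omega
      have hspec := PySem.Chars.findFrom_natCast_spec s t start.toNat hkle (by rw [hsk]; exact hne)
      rw [hsk] at hspec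
      obtain ⟨hge, hpre, -⟩ := hspec
      have hw1 : 1 ≤ (t.length : Int) := by
        have : t.length ≠ 0 := fun h => ht (List.eq_nil_of_length_eq_zero h)
        omega
      have hfit : PySem.Chars.findFrom s t start + (t.length : Int) ≤ (s.length : Int) := by
        have hl := hpre.length_le
        rw [List.length_drop] at hl
        omega
      have hany : spans.any (fun existing =>
          pvOverlaps (PySem.Chars.findFrom s t start,
            PySem.Chars.findFrom s t start + (t.length : Int)) existing) = false := by
        rw [List.any_eq_false]
        intro p hp
        have h2 := hsp p hp
        simp only [pvOverlaps, Bool.and_eq_true, decide_eq_true_eq, not_and]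
        intro h3
        omega
      rw [if_neg (by rw [hany]; exact Bool.false_ne_true)]
      rw [ih (PySem.Chars.findFrom s t start + (t.length : Int)) _ _ (by omega) hfit
        (by
          intro p hp
          rcases List.mem_append.mp hp with h | h
          · have := hsp p h; omega
          · obtain rfl : p = _ := by simpa using h
            simp)]
      simp [List.append_assoc]

-- a term every occurrence of which overlaps some existing span changes nothing
theorem pvAInner_stuck (s t : List Char) (ht : t ≠ []) (spans : List (Int × Int))
    (hall : ∀ i : Int, 0 ≤ i → t <+: s.drop i.toNat →
      ∃ p ∈ spans, p.1 < i + (t.length : Int) ∧ i < p.2) :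
    ∀ (fuel : Nat) (start : Int) (matched : List (List Char)),
      0 ≤ start → start ≤ (s.length : Int) →
      pvAInner s t fuel start spans matched = (spans, matched) := by
  intro fuel
  induction fuel with
  | zero => intro start matched _ _; rfl
  | succ fuel ih =>
    intro start matched h0 hsl
    simp only [pvAInner]
    by_cases hneg : PySem.Chars.findFrom s t start < 0
    · simp [if_pos hneg]
    · simp only [if_neg hneg]
      have hne : PySem.Chars.findFrom s t start ≠ -1 := by omega
      have hsk : ((start.toNat : Int)) = start := Int.toNat_of_nonneg h0
      have hkle : start.toNat ≤ s.length := by omega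
      have hspec := PySem.Chars.findFrom_natCast_spec s t start.toNat hkle (by rw [hsk]; exact hne)
      rw [hsk] at hspec
      obtain ⟨hge, hpre, -⟩ := hspec
      have hw1 : 1 ≤ (t.length : Int) := by
        have : t.length ≠ 0 := fun h => ht (List.eq_nil_of_length_eq_zero h)
        omega
      have hfit : PySem.Chars.findFrom s t start + (t.length : Int) ≤ (s.length : Int) := by
        have hl := hpre.length_le
        rw [List.length_drop] at hl
        omega
      obtain ⟨p, hp, hov⟩ := hall (PySem.Chars.findFrom s t start) (by omega) hpre
      have hany : spans.any (fun existing =>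
          pvOverlaps (PySem.Chars.findFrom s t start,
            PySem.Chars.findFrom s t start + (t.length : Int)) existing) = true := by
        rw [List.any_eq_true]
        exact ⟨p, hp, by simp only [pvOverlaps, Bool.and_eq_true, decide_eq_true_eq]; exact ⟨hov.2, hov.1⟩⟩
      rw [if_pos hany]
      exact ih (PySem.Chars.findFrom s t start + 1) matched (by omega) (by omega)

theorem pvAInner_mono (s t : List Char) :
    ∀ (fuel : Nat) (start : Int) (spans : List (Int × Int)) (matched : List (List Char))
      (x : List Char), x ∈ matched → x ∈ (pvAInner s t fuel start spans matched).2 := by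
  intro fuel
  induction fuel with
  | zero => intro start spans matched x hx; exact hx
  | succ fuel ih =>
    intro start spans matched x hx
    simp only [pvAInner]
    by_cases hneg : PySem.Chars.findFrom s t start < 0
    · simp only [if_pos hneg]; exact hx
    · simp only [if_neg hneg]
      by_cases hc : spans.any (fun existing =>
          pvOverlaps (PySem.Chars.findFrom s t start,
            PySem.Chars.findFrom s t start + (t.length : Int)) existing) = true
      · rw [if_pos hc]; exact ih _ _ _ x hx
      · rw [if_neg hc]; exact ih _ _ _ x (List.mem_append.mpr (Or.inl hx))

theorem pvFold_mono (s : List Char) (terms : List (List Char)) :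
    ∀ (st : List (Int × Int) × List (List Char)) (x : List Char), x ∈ st.2 →
      x ∈ (terms.foldl (fun st term => pvAInner s term (s.length + 2) 0 st.1 st.2) st).2 := by
  induction terms with
  | nil => intro st x hx; exact hx
  | cons t ts ih =>
    intro st x hx
    exact ih _ x (pvAInner_mono s t _ 0 st.1 st.2 x hx)

-- a term with an occurrence disjoint from every existing span gets matched
theorem pvAInner_hits (s t : List Char) (ht : t ≠ []) :
    ∀ (fuel : Nat) (start : Int) (spans : List (Int × Int)) (matched : List (List Char)),
      0 ≤ start → (s.length : Int) + 1 ≤ start + fuel →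
      (∃ i : Int, start ≤ i ∧ t <+: s.drop i.toNat ∧
        ∀ p ∈ spans, p.2 ≤ i ∨ i + (t.length : Int) ≤ p.1) →
      t ∈ (pvAInner s t fuel start spans matched).2 := by
  intro fuel
  induction fuel with
  | zero =>
    intro start spans matched h0 hfc ⟨i, hsi, hpre, _⟩
    exfalso
    have hw1 : 1 ≤ (t.length : Int) := by
      have : t.length ≠ 0 := fun h => ht (List.eq_nil_of_length_eq_zero h)
      omega
    have hl := hpre.length_le
    rw [List.length_drop] at hl
    omega
  | succ fuel ih =>
    intro start spans matched h0 hfc ⟨i, hsi, hpre, hdis⟩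
    have hw1 : 1 ≤ (t.length : Int) := by
      have : t.length ≠ 0 := fun h => ht (List.eq_nil_of_length_eq_zero h)
      omega
    have hl := hpre.length_le
    rw [List.length_drop] at hl
    have hsl : start ≤ (s.length : Int) := by omega
    have hsk : ((start.toNat : Int)) = start := Int.toNat_of_nonneg h0
    have hkle : start.toNat ≤ s.length := by omega
    have hinf : t <:+: s.drop start.toNat := by
      have hdd : s.drop i.toNat = (s.drop start.toNat).drop (i.toNat - start.toNat) := by
        rw [List.drop_drop]
        congr 1
        omega
      rw [hdd] at hpre
      exact pv_prefix_drop_infix _ t _ hpre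
    have hne : PySem.Chars.findFrom s t start ≠ -1 := by
      rw [show start = ((start.toNat : Int)) from hsk.symm]
      rw [Ne, PySem.Chars.findFrom_natCast_eq_neg_one_iff s t start.toNat hkle]
      simpa using hinf
    have hspec := PySem.Chars.findFrom_natCast_spec s t start.toNat hkle (by rw [hsk]; exact hne)
    rw [hsk] at hspec
    obtain ⟨hge, hpreI, hmin⟩ := hspec
    have hidx0 : 0 ≤ PySem.Chars.findFrom s t start := by omega
    simp only [pvAInner]
    rw [if_neg (by omega)]
    by_cases hc : spans.any (fun existing =>
        pvOverlaps (PySem.Chars.findFrom s t start,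
          PySem.Chars.findFrom s t start + (t.length : Int)) existing) = true
    · rw [if_pos hc]
      obtain ⟨p, hp, hov⟩ := List.any_eq_true.mp hc
      simp only [pvOverlaps, Bool.and_eq_true, decide_eq_true_eq] at hov
      have hine : i ≠ PySem.Chars.findFrom s t start := by
        intro hcon
        rcases hdis p hp with h | h <;> omega
      have higt : PySem.Chars.findFrom s t start + 1 ≤ i := by
        by_contra hlt
        have hiN : i.toNat < (PySem.Chars.findFrom s t start).toNat := by omega
        exact hmin i.toNat (by omega) hiN hpre
      exact ih (PySem.Chars.findFrom s t start + 1) spans matched (by omega) (by omega)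
        ⟨i, higt, hpre, hdis⟩
    · rw [if_neg hc]
      exact pvAInner_mono s t fuel _ _ _ t (List.mem_append.mpr (Or.inr (by simp)))

-- every occurrence of t overlaps one of t's own canonical spans
theorem pvCanon_covers (s t : List Char) (ht : t ≠ []) :
    ∀ (fuel : Nat) (le i : Int), 0 ≤ le → (s.length : Int) + 1 ≤ le + fuel →
      le ≤ i → t <+: s.drop i.toNat →
      ∃ p ∈ pvCanon s t fuel le, p.1 < i + (t.length : Int) ∧ i < p.2 := by
  intro fuel
  induction fuel with
  | zero =>
    intro le i h0 hfc hli hpre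
    exfalso
    have hw1 : 1 ≤ (t.length : Int) := by
      have : t.length ≠ 0 := fun h => ht (List.eq_nil_of_length_eq_zero h)
      omega
    have hl := hpre.length_le
    rw [List.length_drop] at hl
    omega
  | succ fuel ih =>
    intro le i h0 hfc hli hpre
    have hw1 : 1 ≤ (t.length : Int) := by
      have : t.length ≠ 0 := fun h => ht (List.eq_nil_of_length_eq_zero h)
      omega
    have hl := hpre.length_le
    rw [List.length_drop] at hl
    have hsk : ((le.toNat : Int)) = le := Int.toNat_of_nonneg h0
    have hkle : le.toNat ≤ s.length := by omega
    have hinf : t <:+: s.drop le.toNat := by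
      have hdd : s.drop i.toNat = (s.drop le.toNat).drop (i.toNat - le.toNat) := by
        rw [List.drop_drop]
        congr 1
        omega
      rw [hdd] at hpre
      exact pv_prefix_drop_infix _ t _ hpre
    have hne : PySem.Chars.findFrom s t le ≠ -1 := by
      rw [show le = ((le.toNat : Int)) from hsk.symm]
      rw [Ne, PySem.Chars.findFrom_natCast_eq_neg_one_iff s t le.toNat hkle]
      simpa using hinf
    have hspec := PySem.Chars.findFrom_natCast_spec s t le.toNat hkle (by rw [hsk]; exact hne)
    rw [hsk] at hspec
    obtain ⟨hge, hpreI, hmin⟩ := hspec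
    have hidx0 : 0 ≤ PySem.Chars.findFrom s t le := by omega
    have hile : PySem.Chars.findFrom s t le ≤ i := by
      by_contra hlt
      exact hmin i.toNat (by omega) (by omega) hpre
    simp only [pvCanon]
    rw [if_neg (by omega)]
    by_cases hclose : i < PySem.Chars.findFrom s t le + (t.length : Int)
    · exact ⟨(PySem.Chars.findFrom s t le, PySem.Chars.findFrom s t le + (t.length : Int)),
        by simp, by omega, by omega⟩
    · have hlI := hpreI.length_le
      rw [List.length_drop] at hlI
      obtain ⟨p, hp, hov⟩ := ih (PySem.Chars.findFrom s t le + (t.length : Int)) i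
        (by omega) (by omega) (by omega) hpre
      exact ⟨p, by simp [hp], hov⟩

theorem pv_exists_first_split {α : Type} (p : α → Bool) :
    ∀ (l : List α), l.any p = true →
      ∃ l₁ a l₂, l = l₁ ++ a :: l₂ ∧ p a = true ∧ ∀ x ∈ l₁, p x = false := by
  intro l
  induction l with
  | nil => intro h; simp at h
  | cons a l ih =>
    intro h
    by_cases ha : p a = true
    · exact ⟨[], a, l, rfl, ha, by simp⟩
    · have hl : l.any p = true := by
        rcases List.any_eq_true.mp h with ⟨x, hx, hpx⟩
        rcases List.mem_cons.mp hx with rfl | hx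
        · exact absurd hpx ha
        · exact List.any_eq_true.mpr ⟨x, hx, hpx⟩
      obtain ⟨l₁, b, l₂, rfl, hb, hl₁⟩ := ih hl
      exact ⟨a :: l₁, b, l₂, rfl, hb, by
        intro x hx
        rcases List.mem_cons.mp hx with rfl | hx
        · exact Bool.eq_false_iff.mpr ha
        · exact hl₁ x hx⟩

-- B's greedy fold skips every position below last_end
theorem pvBfold_skip (w : Int) :
    ∀ (L : List Int) (acc : List (Int × Int)) (le : Int), (∀ i ∈ L, ¬ le ≤ i) →
      L.foldl (fun st i => if st.2 ≤ i then (st.1 ++ [(i, i + w)], i + w) else st) (acc, le)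
        = (acc, le) := by
  intro L
  induction L with
  | nil => intro acc le _; rfl
  | cons i L ih =>
    intro acc le h
    rw [List.foldl_cons, if_neg (h i (by simp))]
    exact ih acc le (fun x hx => h x (by simp [hx]))

-- B's last_end greedy over the occurrence list equals the canonical find run
theorem pvBfold_canon (s t : List Char) (ht : t ≠ []) :
    ∀ (fuel : Nat) (le : Int) (L : List Int) (acc : List (Int × Int)),
      0 ≤ le → le ≤ (s.length : Int) → (s.length : Int) + 1 ≤ le + fuel →
      (∀ i : Int, le ≤ i → (i ∈ L ↔ (i < (s.length : Int) ∧ t <+: s.drop i.toNat))) →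
      L.Pairwise (· < ·) →
      (L.foldl (fun st i =>
          if st.2 ≤ i then (st.1 ++ [(i, i + (t.length : Int))], i + (t.length : Int)) else st)
        (acc, le)).1 = acc ++ pvCanon s t fuel le := by
  intro fuel
  induction fuel with
  | zero =>
    intro le L acc h0 hlen hfc _ _
    exfalso
    omega
  | succ fuel ih =>
    intro le L acc h0 hlen hfc hchar hpw
    have hw1 : 1 ≤ (t.length : Int) := by
      have : t.length ≠ 0 := fun h => ht (List.eq_nil_of_length_eq_zero h)
      omega
    have hsk : ((le.toNat : Int)) = le := Int.toNat_of_nonneg h0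
    have hkle : le.toNat ≤ s.length := by omega
    by_cases hneg : PySem.Chars.findFrom s t le < 0
    · have hnone : ∀ i ∈ L, ¬ le ≤ i := by
        intro i hiL hle
        obtain ⟨hilt, hpre⟩ := (hchar i hle).mp hiL
        have hinf : t <:+: s.drop le.toNat := by
          have hdd : s.drop i.toNat = (s.drop le.toNat).drop (i.toNat - le.toNat) := by
            rw [List.drop_drop]; congr 1; omega
          rw [hdd] at hpre
          exact pv_prefix_drop_infix _ t _ hpre
        have hne : PySem.Chars.findFrom s t le ≠ -1 := by
          rw [show le = ((le.toNat : Int)) from hsk.symm]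
          rw [Ne, PySem.Chars.findFrom_natCast_eq_neg_one_iff s t le.toNat hkle]
          simpa using hinf
        have hspec := PySem.Chars.findFrom_natCast_spec s t le.toNat hkle (by rw [hsk]; exact hne)
        rw [hsk] at hspec
        omega
      rw [pvBfold_skip _ L acc le hnone]
      simp [pvCanon, if_pos hneg]
    · have hne : PySem.Chars.findFrom s t le ≠ -1 := by omega
      have hspec := PySem.Chars.findFrom_natCast_spec s t le.toNat hkle (by rw [hsk]; exact hne)
      rw [hsk] at hspec
      obtain ⟨hge, hpreI, hmin⟩ := hspec
      have hidx0 : 0 ≤ PySem.Chars.findFrom s t le := by omega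
      have hlI := hpreI.length_le
      rw [List.length_drop] at hlI
      have hidxL : PySem.Chars.findFrom s t le ∈ L :=
        (hchar _ hge).mpr ⟨by omega, hpreI⟩
      have hany : L.any (fun i => decide (le ≤ i)) = true :=
        List.any_eq_true.mpr ⟨_, hidxL, by simpa using hge⟩
      obtain ⟨L₁, i₀, L₂, hL, hpi, hnl₁⟩ := pv_exists_first_split _ L hany
      rw [decide_eq_true_eq] at hpi
      have hi₀occ := (hchar i₀ hpi).mp (hL ▸ (by simp : i₀ ∈ L₁ ++ i₀ :: L₂))
      have hi₀ge : PySem.Chars.findFrom s t le ≤ i₀ := by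
        by_contra hlt
        exact hmin i₀.toNat (by omega) (by omega) hi₀occ.2
      have hi₀eq : i₀ = PySem.Chars.findFrom s t le := by
        rcases List.mem_append.mp (hL ▸ hidxL) with h | h
        · exact absurd (by simpa using hnl₁ _ h) (by simpa using hge)
        · rcases List.mem_cons.mp h with h | h
          · omega
          · exfalso
            have hpw' : (i₀ :: L₂).Pairwise (· < ·) :=
              (hL ▸ hpw).sublist (List.sublist_append_right L₁ (i₀ :: L₂))
            have := (List.pairwise_cons.mp hpw').1 _ h
            omega
      rw [hi₀eq] at hL hpi
      rw [hL, List.foldl_append, pvBfold_skip _ L₁ acc le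
        (fun x hx => by simpa using hnl₁ x hx)]
      rw [List.foldl_cons, if_pos (by simpa using hpi)]
      have hpwL₂ : L₂.Pairwise (· < ·) :=
        (hL ▸ hpw).sublist (((List.sublist_cons_self _ L₂).trans
          (List.sublist_append_right L₁ _)))
      rw [ih (PySem.Chars.findFrom s t le + (t.length : Int)) L₂
        (acc ++ [(PySem.Chars.findFrom s t le, PySem.Chars.findFrom s t le + (t.length : Int))])
        (by omega) (by omega) (by omega)
        (by
          intro i hle'
          constructor
          · intro hiL₂
            exact (hchar i (by omega)).mp (hL ▸ (by simp [hiL₂] : i ∈ L₁ ++ PySem.Chars.findFrom s t le :: L₂))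
          · intro hocc
            have hiL : i ∈ L := (hchar i (by omega)).mpr hocc
            rcases List.mem_append.mp (hL ▸ hiL) with h | h
            · exact absurd (by omega : le ≤ i) (by simpa using hnl₁ _ h)
            · rcases List.mem_cons.mp h with h | h
              · omega
              · exact h)
        hpwL₂]
      simp [pvCanon, if_neg hneg, List.append_assoc]
  

theorem pvAUnique_of_mem_seen (f : List Char) :
    ∀ (ts : List (List Char)) (seen : PySem.Set (List Char)) (unique : List (List Char)),
      (∀ x ∈ ts, x = f) → f ∈ seen → pvAUnique ts seen unique = unique := by
  intro ts
  induction ts with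
  | nil => intro seen unique _ _; rfl
  | cons t rest ih =>
    intro seen unique hall hf
    obtain rfl : t = f := hall t (by simp)
    rw [pvAUnique, if_pos ((PySem.Set.contains_iff seen t).mpr hf)]
    exact ih seen unique (fun x hx => hall x (by simp [hx])) hf

theorem pvAUnique_all_eq (f : List Char) :
    ∀ (ts : List (List Char)) (seen : PySem.Set (List Char)) (unique : List (List Char)),
      (∀ x ∈ ts, x = f) → ts ≠ [] → f ∉ seen → pvAUnique ts seen unique = unique ++ [f] := by
  intro ts
  cases ts with
  | nil => intro seen unique _ h _; exact absurd rfl h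
  | cons t rest =>
    intro seen unique hall _ hf
    obtain rfl : t = f := hall t (by simp)
    have hcf : PySem.Set.contains seen t ≠ true := fun hc => hf ((PySem.Set.contains_iff seen t).mp hc)
    rw [pvAUnique, if_neg hcf]
    exact pvAUnique_of_mem_seen t rest (PySem.Set.add seen t) (unique ++ [t])
      (fun x hx => hall x (by simp [hx]))
      ((PySem.Set.mem_add seen t t).mpr (Or.inr rfl))

theorem pvAUnique_mono :
    ∀ (ts : List (List Char)) (seen : PySem.Set (List Char)) (unique : List (List Char))
      (y : List Char), y ∈ unique → y ∈ pvAUnique ts seen unique := by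
  intro ts
  induction ts with
  | nil => intro seen unique y hy; exact hy
  | cons t rest ih =>
    intro seen unique y hy
    rw [pvAUnique]
    by_cases hc : PySem.Set.contains seen t
    · rw [if_pos hc]; exact ih seen unique y hy
    · rw [if_neg hc]; exact ih _ _ y (List.mem_append.mpr (Or.inl hy))

theorem pvAUnique_mem :
    ∀ (ts : List (List Char)) (seen : PySem.Set (List Char)) (unique : List (List Char))
      (x : List Char), x ∈ ts → x ∉ seen → x ∈ pvAUnique ts seen unique := by
  intro ts
  induction ts with
  | nil => intro seen unique x hx; simp at hx
  | cons t rest ih =>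
    intro seen unique x hx hseen
    rw [pvAUnique]
    by_cases hxt : x = t
    · subst hxt
      rw [if_neg (fun hc => hseen ((PySem.Set.contains_iff seen x).mp hc))]
      exact pvAUnique_mono rest _ _ x (by simp)
    · have hxr : x ∈ rest := by
        rcases List.mem_cons.mp hx with h | h
        · exact absurd h hxt
        · exact h
      by_cases hc : PySem.Set.contains seen t
      · rw [if_pos hc]; exact ih seen unique x hxr hseen
      · rw [if_neg hc]
        refine ih _ _ x hxr ?_
        intro hmem
        rcases (PySem.Set.mem_add seen t x).mp hmem with h | h
        · exact hseen h
        · exact hxt h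

theorem pv_two_mem_ne {α : Type} {l : List α} {x y : α}
    (hx : x ∈ l) (hy : y ∈ l) (hne : x ≠ y) : 1 < l.length := by
  cases l with
  | nil => simp at hx
  | cons a t =>
    cases t with
    | nil => simp_all
    | cons b u => simp [List.length_cons]

theorem pvFirstIdx_none (s : List Char) :
    ∀ (terms : List (List Char)) (j : Nat),
      pvFirstIdx s terms j = none ↔ ∀ t ∈ terms, pvOcc s t = [] := by
  intro terms
  induction terms with
  | nil => intro j; simp [pvFirstIdx]
  | cons t rest ih =>
    intro j
    rw [pvFirstIdx]
    by_cases h : pvOcc s t ≠ []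
    · simp only [if_pos h]
      constructor
      · intro hc; cases hc
      · intro hall; exact absurd (hall t (by simp)) h
    · simp only [if_neg h]
      rw [ih (j + 1)]
      push Not at h
      constructor
      · intro hall x hx
        rcases List.mem_cons.mp hx with rfl | hx
        · exact h
        · exact hall x hx
      · intro hall x hx; exact hall x (by simp [hx])

theorem pvFirstIdx_some (s : List Char) :
    ∀ (terms : List (List Char)) (j k : Nat), pvFirstIdx s terms j = some k →
      ∃ P t1 suf, terms = P ++ t1 :: suf ∧ j + P.length = k ∧
        (∀ t ∈ P, pvOcc s t = []) ∧ pvOcc s t1 ≠ [] := by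
  intro terms
  induction terms with
  | nil => intro j k h; simp [pvFirstIdx] at h
  | cons t rest ih =>
    intro j k h
    rw [pvFirstIdx] at h
    by_cases hne : pvOcc s t ≠ []
    · rw [if_pos hne] at h
      obtain rfl : j = k := Option.some.inj h
      exact ⟨[], t, rest, rfl, by simp, by simp, hne⟩
    · rw [if_neg hne] at h
      obtain ⟨P, t1, suf, rfl, hlen, hP, ht1⟩ := ih (j + 1) k h
      push Not at hne
      refine ⟨t :: P, t1, suf, rfl, by simp [← hlen]; omega, ?_, ht1⟩
      intro x hx
      rcases List.mem_cons.mp hx with rfl | hx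
      · exact hne
      · exact hP x hx

theorem pv_getD_append {α : Type} (P : List α) (t1 : α) (suf : List α) (d : α) :
    (P ++ t1 :: suf).getD P.length d = t1 := by
  rw [List.getD_eq_getElem?_getD, List.getElem?_append_right (le_refl P.length)]
  simp

theorem pvFold_stuck (s : List Char) (spans : List (Int × Int)) :
    ∀ (terms : List (List Char)),
      (∀ t ∈ terms, t ≠ [] ∧ ∀ i : Int, 0 ≤ i → t <+: s.drop i.toNat →
        ∃ p ∈ spans, p.1 < i + (t.length : Int) ∧ i < p.2) →
      ∀ matched, terms.foldl (fun st term => pvAInner s term (s.length + 2) 0 st.1 st.2)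
          (spans, matched) = (spans, matched) := by
  intro terms
  induction terms with
  | nil => intro _ matched; rfl
  | cons t ts ih =>
    intro h matched
    obtain ⟨ht, hall⟩ := h t (by simp)
    have hst := pvAInner_stuck s t ht spans hall (s.length + 2) 0 matched le_rfl
      (by exact_mod_cast Int.natCast_nonneg s.length)
    simp only [List.foldl_cons]
    show ts.foldl _ (pvAInner s t (s.length + 2) 0 spans matched) = _
    rw [hst]
    exact ih (fun x hx => h x (by simp [hx])) matched

-- ===== VERDICT (by name: the statement is the Claim_ definition above) =====
theorem extract_room_from_name_py_spec : Claim_equal_extract_room_from_name_py := by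
  intro name room_terms _ hpre
  unfold Spec_extract_room_from_name_py
  unfold extract_room_from_name_py extract_room_from_name_py_alt
  by_cases hbase : name.toList = [] ∨ room_terms = []
  · simp only [if_pos hbase]
  · simp only [if_neg hbase]
    have hname : ¬ name.toList = [] := fun h => hbase (Or.inl h)
    have hterms : ∀ t ∈ room_terms.map String.toList, t ≠ [] := by
      intro t htm
      obtain ⟨u, hu, rfl⟩ := List.mem_map.mp htm
      rcases hpre with h | h
      · exact absurd h hname
      · exact h u hu
    have hocc_mem : ∀ (t : List Char), t ≠ [] → ∀ i : Int, 0 ≤ i →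
        t <+: name.toList.drop i.toNat → i ∈ pvOcc name.toList t := by
      intro t ht i h0 hp
      have hw1 : 1 ≤ (t.length : Int) := by
        have : t.length ≠ 0 := fun h => ht (List.eq_nil_of_length_eq_zero h)
        omega
      have hl := hp.length_le
      rw [List.length_drop] at hl
      exact (pv_mem_pvOcc name.toList t i).mpr ⟨h0, by omega, hp⟩
    cases hfi : pvFirstIdx name.toList (room_terms.map String.toList) 0 with
    | none =>
      have hall := (pvFirstIdx_none name.toList _ 0).mp hfi
      have hfold := pvFold_stuck name.toList [] (room_terms.map String.toList)
        (by
          intro t htm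
          refine ⟨hterms t htm, ?_⟩
          intro i h0 hp
          exfalso
          have := hocc_mem t (hterms t htm) i h0 hp
          rw [hall t htm] at this
          simp at this) []
      rw [hfold]
      simp [pvAUnique]
    | some k =>
      obtain ⟨P, t1, suf, hT, hk, hP, ht1occ⟩ :=
        pvFirstIdx_some name.toList (room_terms.map String.toList) 0 k hfi
      have hkP : k = P.length := by omega
      have ht1 : t1 ≠ [] := hterms t1 (hT ▸ (by simp : t1 ∈ P ++ t1 :: suf))
      have hw1 : 1 ≤ (t1.length : Int) := by
        have : t1.length ≠ 0 := fun h => ht1 (List.eq_nil_of_length_eq_zero h)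
        omega
      rw [hT, hkP]
      simp only [pv_getD_append]
      have hdrop : (P ++ t1 :: suf).drop (P.length + 1) = suf := by simp
      rw [hdrop]
      -- B's greedy fold is the canonical find run
      have hBf := pvBfold_canon name.toList t1 ht1 (name.toList.length + 2) 0
        (pvOcc name.toList t1) []
        le_rfl (by exact_mod_cast Int.natCast_nonneg name.toList.length) (by push_cast; omega)
        (by
          intro i hi
          rw [pv_mem_pvOcc]
          exact ⟨fun ⟨_, a, b⟩ => ⟨a, b⟩, fun ⟨a, b⟩ => ⟨hi, a, b⟩⟩)
        (pv_pvOcc_pairwise name.toList t1)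
      rw [hBf, List.nil_append]
      -- A's fold over the prefix keeps ([], [])
      have hPfold := pvFold_stuck name.toList [] P
        (by
          intro t htm
          refine ⟨hterms t (hT ▸ List.mem_append.mpr (Or.inl htm)), ?_⟩
          intro i h0 hp
          exfalso
          have := hocc_mem t (hterms t (hT ▸ List.mem_append.mpr (Or.inl htm))) i h0 hp
          rw [hP t htm] at this
          simp at this) []
      rw [List.foldl_append, hPfold, List.foldl_cons]
      -- A accepts exactly the canonical spans on t1
      have hAcc := pvAInner_accepts name.toList t1 ht1 (name.toList.length + 2) 0 [] []
        le_rfl (by exact_mod_cast Int.natCast_nonneg name.toList.length) (by simp)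
      show (if pvAUnique (suf.foldl _ (pvAInner name.toList t1 (name.toList.length + 2) 0 [] [])).2
              PySem.Set.empty [] = [] then _ else _) = _
      rw [hAcc, List.nil_append, List.nil_append]
      have hcov : ∀ i : Int, 0 ≤ i → t1 <+: name.toList.drop i.toNat →
          ∃ p ∈ pvCanon name.toList t1 (name.toList.length + 2) 0,
            p.1 < i + (t1.length : Int) ∧ i < p.2 := by
        intro i h0 hp
        exact pvCanon_covers name.toList t1 ht1 (name.toList.length + 2) 0 i le_rfl
          (by push_cast; omega) h0 hp
      obtain ⟨i0, hi0⟩ := List.exists_mem_of_ne_nil _ ht1occ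
      obtain ⟨hi00, hi0lt, hi0p⟩ := (pv_mem_pvOcc name.toList t1 i0).mp hi0
      obtain ⟨p0, hp0, -⟩ := hcov i0 hi00 hi0p
      have hCne : pvCanon name.toList t1 (name.toList.length + 2) 0 ≠ [] := by
        intro h
        rw [h] at hp0
        simp at hp0
      have ht1M1 : t1 ∈ (pvCanon name.toList t1 (name.toList.length + 2) 0).map
          (fun _ => t1) := List.mem_map.mpr ⟨p0, hp0, rfl⟩
      -- terms failing B's disjoint-occurrence test leave A's state unchanged
      have hstuck : ∀ x ∈ suf,
          (decide (x ≠ t1) && (pvOcc name.toList x).any (fun i =>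
            (pvCanon name.toList t1 (name.toList.length + 2) 0).all (fun p =>
              decide (p.2 ≤ i) || decide (i + (x.length : Int) ≤ p.1)))) = false →
          x ≠ [] ∧ ∀ i : Int, 0 ≤ i → x <+: name.toList.drop i.toNat →
            ∃ p ∈ pvCanon name.toList t1 (name.toList.length + 2) 0,
              p.1 < i + (x.length : Int) ∧ i < p.2 := by
        intro x hx hfalse
        have hxne : x ≠ [] := hterms x (hT ▸ List.mem_append.mpr (Or.inr (by simp [hx])))
        refine ⟨hxne, ?_⟩
        intro i h0 hp
        rcases Bool.and_eq_false_iff.mp hfalse with h | h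
        · have hxt1 : x = t1 := by simpa using h
          subst hxt1
          exact hcov i h0 hp
        · have hiMem := hocc_mem x hxne i h0 hp
          have hallf := List.any_eq_false.mp h i hiMem
          rw [Bool.not_eq_true] at hallf
          obtain ⟨p, hpmem, hpf⟩ := List.all_eq_false.mp hallf
          rw [Bool.not_eq_true] at hpf
          rcases Bool.or_eq_false_iff.mp hpf with ⟨h1, h2⟩
          rw [decide_eq_false_iff_not, not_le] at h1 h2
          exact ⟨p, hpmem, by omega⟩
      by_cases hb : suf.any (fun t =>
          decide (t ≠ t1) && (pvOcc name.toList t).any (fun i =>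
            (pvCanon name.toList t1 (name.toList.length + 2) 0).all (fun p =>
              decide (p.2 ≤ i) || decide (i + (t.length : Int) ≤ p.1)))) = true
      · rw [if_pos hb]
        obtain ⟨S1, t', S2, hsuf, hpt', hS1⟩ := pv_exists_first_split _ suf hb
        rw [hsuf, List.foldl_append]
        have hS1fold := pvFold_stuck name.toList
          (pvCanon name.toList t1 (name.toList.length + 2) 0) S1
          (fun x hxm => hstuck x (hsuf ▸ List.mem_append.mpr (Or.inl hxm)) (hS1 x hxm))
          ((pvCanon name.toList t1 (name.toList.length + 2) 0).map (fun _ => t1))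
        rw [hS1fold, List.foldl_cons]
        simp only [Bool.and_eq_true] at hpt'
        obtain ⟨hne', hany'⟩ := hpt'
        have ht'ne : t' ≠ t1 := by simpa using hne'
        have ht'nil : t' ≠ [] := hterms t'
          (hT ▸ List.mem_append.mpr (Or.inr (by simp [hsuf])))
        obtain ⟨i, hiM, hidis⟩ := List.any_eq_true.mp hany'
        obtain ⟨hi0, hilt, hip⟩ := (pv_mem_pvOcc name.toList t' i).mp hiM
        have hdisj : ∀ p ∈ pvCanon name.toList t1 (name.toList.length + 2) 0,
            p.2 ≤ i ∨ i + (t'.length : Int) ≤ p.1 := by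
          intro p hpm
          have h2 := List.all_eq_true.mp hidis p hpm
          simp only [Bool.or_eq_true] at h2
          rcases h2 with h | h
          · exact Or.inl (by simpa using h)
          · exact Or.inr (by simpa using h)
        have ht'mem : t' ∈ (pvAInner name.toList t' (name.toList.length + 2) 0
            (pvCanon name.toList t1 (name.toList.length + 2) 0)
            ((pvCanon name.toList t1 (name.toList.length + 2) 0).map (fun _ => t1))).2 :=
          pvAInner_hits name.toList t' ht'nil (name.toList.length + 2) 0 _ _
            le_rfl (by push_cast; omega) ⟨i, hi0, hip, hdisj⟩
        have ht1mem : t1 ∈ (pvAInner name.toList t' (name.toList.length + 2) 0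
            (pvCanon name.toList t1 (name.toList.length + 2) 0)
            ((pvCanon name.toList t1 (name.toList.length + 2) 0).map (fun _ => t1))).2 :=
          pvAInner_mono name.toList t' _ 0 _ _ t1 ht1M1
        have hfin' : t' ∈ (S2.foldl (fun st term =>
            pvAInner name.toList term (name.toList.length + 2) 0 st.1 st.2)
            (pvAInner name.toList t' (name.toList.length + 2) 0
              (pvCanon name.toList t1 (name.toList.length + 2) 0)
              ((pvCanon name.toList t1 (name.toList.length + 2) 0).map (fun _ => t1)))).2 :=
          pvFold_mono name.toList S2 _ t' ht'mem
        have hfin1 : t1 ∈ (S2.foldl (fun st term =>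
            pvAInner name.toList term (name.toList.length + 2) 0 st.1 st.2)
            (pvAInner name.toList t' (name.toList.length + 2) 0
              (pvCanon name.toList t1 (name.toList.length + 2) 0)
              ((pvCanon name.toList t1 (name.toList.length + 2) 0).map (fun _ => t1)))).2 :=
          pvFold_mono name.toList S2 _ t1 ht1mem
        have hu1 := pvAUnique_mem _ PySem.Set.empty [] _ hfin1 (by simp [PySem.Set.empty])
        have hu2 := pvAUnique_mem _ PySem.Set.empty [] _ hfin' (by simp [PySem.Set.empty])
        have hlen2 := pv_two_mem_ne hu1 hu2 (fun h => ht'ne h.symm)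
        have hune := List.ne_nil_of_length_pos (Nat.lt_of_le_of_lt (Nat.zero_le 1) hlen2)
        rw [if_neg hune, if_pos hlen2]
      · rw [if_neg hb]
        have hbf := List.any_eq_false.mp (Bool.not_eq_true _ ▸ hb)
        have hsuffold := pvFold_stuck name.toList
          (pvCanon name.toList t1 (name.toList.length + 2) 0) suf
          (fun x hxm => hstuck x hxm (by
            have := hbf x hxm
            rwa [Bool.not_eq_true] at this))
          ((pvCanon name.toList t1 (name.toList.length + 2) 0).map (fun _ => t1))
        rw [hsuffold]
        have hM1all : ∀ x ∈ (pvCanon name.toList t1 (name.toList.length + 2) 0).map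
            (fun _ => t1), x = t1 := by
          intro x hxm
          obtain ⟨-, -, rfl⟩ := List.mem_map.mp hxm
          rfl
        have hM1ne : (pvCanon name.toList t1 (name.toList.length + 2) 0).map
            (fun _ => t1) ≠ [] := by
          intro h
          exact hCne (List.map_eq_nil_iff.mp h)
        rw [pvAUnique_all_eq t1 _ PySem.Set.empty [] hM1all hM1ne (by simp [PySem.Set.empty])]
        simp
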